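-- pv_equiv track=rewrite | github.com/bignellrp/footyapp | footyapp/__main__.py | even_teams
-- ===== SOURCE A (Python) =====
-- import heapq
--
-- def even_teams(game_players, n=2):
--     teams = [[] for _ in range(n)]
--     totals = [(0, i) for i in range(n)]
--     heapq.heapify(totals)
--     for obj in game_players:
--         total, index = heapq.heappop(totals)
--         teams[index].append(obj)
--         heapq.heappush(totals, (total + obj[1], index))
--     return tuple(teams)
-- ===== SOURCE B (Python) =====
-- def even_teams(game_players, n=2):
--     teams = [[] for _ in range(n)]
--     totals = [0] * n
--     for obj in game_players:
--         j = 0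
--         for i in range(1, n):
--             if totals[i] < totals[j]:
--                 j = i
--         teams[j].append(obj)
--         totals[j] += obj[1]
--     return tuple(teams)
-- ===== Notes on version B (the rewrite author's own statement) =====
-- stated objective: simpler
-- what changed: Replaces the heapq priority queue of (total,index) pairs with a plain list of team totals and a linear argmin scan (strict < in index order, so ties go to the lowest index exactly as the heap's lexicographic order does); no heapq import needed.
import Mathlib
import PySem

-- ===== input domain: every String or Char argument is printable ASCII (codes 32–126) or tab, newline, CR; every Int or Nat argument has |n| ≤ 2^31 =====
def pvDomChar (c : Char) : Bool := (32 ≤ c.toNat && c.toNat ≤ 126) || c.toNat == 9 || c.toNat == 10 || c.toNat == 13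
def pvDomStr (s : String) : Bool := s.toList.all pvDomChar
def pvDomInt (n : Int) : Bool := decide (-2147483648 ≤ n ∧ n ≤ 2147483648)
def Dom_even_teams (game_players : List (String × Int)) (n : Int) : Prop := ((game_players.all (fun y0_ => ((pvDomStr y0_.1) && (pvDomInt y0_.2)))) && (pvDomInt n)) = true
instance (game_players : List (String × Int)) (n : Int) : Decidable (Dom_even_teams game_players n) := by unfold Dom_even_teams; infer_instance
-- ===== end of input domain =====

-- B replaces A's heapq priority queue with a plain list of team totals and a linear
-- argmin scan (objective: simpler); same return value on every input where A returns.

-- ===== PORT A =====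
-- heapq is a library call, ported by its value-level contract: heapify of the initial
-- list is the identity on the underlying multiset, heappop extracts the lexicographically
-- least (total, index) pair (unique here: indices are distinct), heappush appends.
def pvPmin (a b : Int × Nat) : Int × Nat :=
  if b.1 < a.1 ∨ (b.1 = a.1 ∧ b.2 < a.2) then b else a

def pvLexMin : List (Int × Nat) → Int × Nat
  | [] => (0, 0)     -- unreachable under Pre_ (heappop from an empty heap raises in Python)
  | h :: t => t.foldl pvPmin h

def pvStepA (st : List (List (String × Int)) × List (Int × Nat)) (obj : String × Int) :
    List (List (String × Int)) × List (Int × Nat) :=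
  let m := pvLexMin st.2
  (st.1.set m.2 ((st.1.getD m.2 []) ++ [obj]),
   (st.2.erase m) ++ [(m.1 + obj.2, m.2)])

def even_teams (game_players : List (String × Int)) (n : Int) : List (List (String × Int)) :=
  (game_players.foldl pvStepA
    (List.replicate n.toNat [], (List.range n.toNat).map (fun i => ((0 : Int), i)))).1

-- ===== PORT B =====
-- the argmin scan of Source B: j starts at 0, then for i in range(1, n) take i iff totals[i] < totals[j]
def pvArgmin (totals : List Int) (N : Nat) : Nat :=
  (List.range' 1 (N - 1)).foldl
    (fun j i => if totals.getD i 0 < totals.getD j 0 then i else j) 0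

def pvStepB (N : Nat) (st : List (List (String × Int)) × List Int) (obj : String × Int) :
    List (List (String × Int)) × List Int :=
  let j := pvArgmin st.2 N
  (st.1.set j ((st.1.getD j []) ++ [obj]), st.2.set j ((st.2.getD j 0) + obj.2))

def even_teams_alt (game_players : List (String × Int)) (n : Int) : List (List (String × Int)) :=
  (game_players.foldl (pvStepB n.toNat)
    (List.replicate n.toNat [], List.replicate n.toNat (0 : Int))).1

-- ===== PRECONDITION & SPEC =====
-- Pre_ excludes exactly the inputs on which Python A raises IndexError (heappop from an
-- empty heap): a nonempty player list with n < 1.  B raises IndexError there as well.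
def Pre_even_teams (game_players : List (String × Int)) (n : Int) : Prop :=
  game_players = [] ∨ 1 ≤ n
instance (game_players : List (String × Int)) (n : Int) : Decidable (Pre_even_teams game_players n) := by unfold Pre_even_teams; infer_instance

def pvWitness_even_teams : (List (String × Int)) × Int := ([("ann", 3), ("bob", 1), ("cy", 2)], 2)

def Spec_even_teams (game_players : List (String × Int)) (n : Int) (out : List (List (String × Int))) : Prop := out = even_teams_alt game_players n
instance (game_players : List (String × Int)) (n : Int) (out : List (List (String × Int))) : Decidable (Spec_even_teams game_players n out) := by unfold Spec_even_teams; infer_instance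

-- ===== CLAIM (what is proved, stated in full; the proofs are below) =====
def Claim_equal_even_teams : Prop := ∀ (game_players : List (String × Int)) (n : Int), Dom_even_teams game_players n → Pre_even_teams game_players n → Spec_even_teams game_players n (even_teams game_players n)

-- ===== LEMMAS AND PROOFS =====

-- lexicographic ≤ on (total, index) pairs
def pvLe (a b : Int × Nat) : Prop := a.1 < b.1 ∨ (a.1 = b.1 ∧ a.2 ≤ b.2)

-- the canonical multiset of (total, index) pairs A's heap holds, read off B's totals list
def pvCanon (tB : List Int) (N : Nat) : List (Int × Nat) :=
  (List.range N).map (fun i => (tB.getD i 0, i))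

theorem pvLe_refl (a : Int × Nat) : pvLe a a := by simp [pvLe]

theorem pvLe_trans {a b c : Int × Nat} (h₁ : pvLe a b) (h₂ : pvLe b c) : pvLe a c := by
  rcases a with ⟨a1, a2⟩; rcases b with ⟨b1, b2⟩; rcases c with ⟨c1, c2⟩
  simp only [pvLe] at *; omega

theorem pvLe_antisymm {a b : Int × Nat} (h₁ : pvLe a b) (h₂ : pvLe b a) : a = b := by
  rcases a with ⟨a1, a2⟩; rcases b with ⟨b1, b2⟩
  simp only [pvLe] at h₁ h₂
  have : a1 = b1 ∧ a2 = b2 := by omega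
  simp [this.1, this.2]

theorem pvPmin_mem (a b : Int × Nat) : pvPmin a b = a ∨ pvPmin a b = b := by
  unfold pvPmin; split_ifs <;> simp

theorem pvPmin_le (a b : Int × Nat) : pvLe (pvPmin a b) a ∧ pvLe (pvPmin a b) b := by
  rcases a with ⟨a1, a2⟩; rcases b with ⟨b1, b2⟩
  simp only [pvPmin, pvLe]; split_ifs with h <;> simp at * <;> omega

theorem pvLexMin_fold_spec : ∀ (t : List (Int × Nat)) (h : Int × Nat),
    (t.foldl pvPmin h) ∈ h :: t ∧ ∀ x ∈ h :: t, pvLe (t.foldl pvPmin h) x := by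
  intro t
  induction t with
  | nil => intro h; simp [pvLe_refl]
  | cons x t ih =>
    intro h
    obtain ⟨hmem, hle⟩ := ih (pvPmin h x)
    obtain ⟨lh, lx⟩ := pvPmin_le h x
    have hself := hle _ (List.mem_cons_self ..)
    refine ⟨?_, ?_⟩
    · simp only [List.foldl_cons]
      rcases List.mem_cons.1 hmem with hm | hm
      · rcases pvPmin_mem h x with he | he <;> rw [hm, he] <;> simp
      · simp [hm]
    · intro y hy
      simp only [List.foldl_cons]
      rcases List.mem_cons.1 hy with rfl | hy'
      · exact pvLe_trans hself lh
      · rcases List.mem_cons.1 hy' with rfl | hy''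
        · exact pvLe_trans hself lx
        · exact hle _ (List.mem_cons_of_mem _ hy'')

theorem pvArgmin_fold_spec (tB : List Int) :
    ∀ (L : List Nat) (j : Nat), L.Pairwise (· < ·) → (∀ i ∈ L, j < i) →
    (L.foldl (fun j i => if tB.getD i 0 < tB.getD j 0 then i else j) j) ∈ j :: L ∧
    ∀ i ∈ j :: L,
      pvLe (tB.getD (L.foldl (fun j i => if tB.getD i 0 < tB.getD j 0 then i else j) j) 0,
            L.foldl (fun j i => if tB.getD i 0 < tB.getD j 0 then i else j) j)
           (tB.getD i 0, i) := by
  intro L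
  induction L with
  | nil => intro j _ _; simp [pvLe_refl]
  | cons i L ih =>
    intro j hpw hlt
    have hji : j < i := hlt i (List.mem_cons_self ..)
    have hpw' : L.Pairwise (· < ·) := hpw.of_cons
    have hiL : ∀ k ∈ L, i < k := fun k hk => List.rel_of_pairwise_cons hpw hk
    set j' := if tB.getD i 0 < tB.getD j 0 then i else j with hj'
    have hlt' : ∀ k ∈ L, j' < k := by
      intro k hk; rw [hj']; split_ifs
      · exact hiL k hk
      · exact hlt k (List.mem_cons_of_mem _ hk)
    obtain ⟨hmem, hle⟩ := ih j' hpw' hlt'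
    have hj'j : pvLe (tB.getD j' 0, j') (tB.getD j 0, j) := by
      rw [hj']; split_ifs with h
      · exact Or.inl h
      · exact pvLe_refl _
    have hj'i : pvLe (tB.getD j' 0, j') (tB.getD i 0, i) := by
      rw [hj']; split_ifs with h
      · exact pvLe_refl _
      · rcases lt_or_eq_of_le (not_lt.1 h) with h1 | h1
        · exact Or.inl h1
        · exact Or.inr ⟨h1, Nat.le_of_lt hji⟩
    have hself := hle _ (List.mem_cons_self ..)
    refine ⟨?_, ?_⟩
    · simp only [List.foldl_cons, ← hj']
      rcases List.mem_cons.1 hmem with hm | hm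
      · rw [hm, hj']; split_ifs <;> simp
      · exact List.mem_cons_of_mem _ (List.mem_cons_of_mem _ hm)
    · intro k hk
      simp only [List.foldl_cons, ← hj']
      rcases List.mem_cons.1 hk with rfl | hk'
      · exact pvLe_trans hself hj'j
      · rcases List.mem_cons.1 hk' with rfl | hk''
        · exact pvLe_trans hself hj'i
        · exact hle _ (List.mem_cons_of_mem _ hk'')

theorem pvArgmin_spec (tB : List Int) (N : Nat) (hN : 1 ≤ N) :
    pvArgmin tB N < N ∧
    ∀ i < N, pvLe (tB.getD (pvArgmin tB N) 0, pvArgmin tB N) (tB.getD i 0, i) := by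
  have hpw : (List.range' 1 (N - 1)).Pairwise (· < ·) := List.pairwise_lt_range' ..
  have hlt : ∀ i ∈ List.range' 1 (N - 1), 0 < i := by
    intro i hi; have := (List.mem_range'_1.1 hi).1; omega
  obtain ⟨hmem, hle⟩ := pvArgmin_fold_spec tB (List.range' 1 (N - 1)) 0 hpw hlt
  constructor
  · rcases List.mem_cons.1 hmem with hm | hm
    · rw [pvArgmin, hm]; omega
    · have := List.mem_range'_1.1 hm; rw [pvArgmin]; omega
  · intro i hi
    rcases Nat.eq_zero_or_pos i with rfl | hpos
    · exact hle _ (List.mem_cons_self ..)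
    · exact hle i (List.mem_cons_of_mem _ (List.mem_range'_1.2 ⟨hpos, by omega⟩))

theorem pvCanon_split (tB : List Int) (N j : Nat) (hj : j < N) :
    pvCanon tB N =
      (List.range' 0 j).map (fun i => (tB.getD i 0, i)) ++
      (tB.getD j 0, j) :: (List.range' (j+1) (N - j - 1)).map (fun i => (tB.getD i 0, i)) := by
  have h1 : List.range N = List.range' 0 j ++ List.range' j (N - j) := by
    conv_lhs => rw [List.range_eq_range', show N = j + (N - j) by omega]
    rw [← List.range'_append]
    norm_num
  have h2 : List.range' j (N - j) = j :: List.range' (j+1) (N - j - 1) := by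
    conv_lhs => rw [show N - j = (N - j - 1) + 1 by omega, List.range'_succ]
  rw [pvCanon, h1, h2, List.map_append, List.map_cons]

theorem pvNotMem_left (tB : List Int) (j : Nat) (v : Int) :
    (v, j) ∉ (List.range' 0 j).map (fun i => (tB.getD i 0, i)) := by
  intro h
  obtain ⟨i, hi, he⟩ := List.mem_map.1 h
  have := (List.mem_range'_1.1 hi).2
  have : i = j := congrArg Prod.snd he
  omega

theorem pvGetD_set_ne (l : List Int) (j i : Nat) (v : Int) (h : j ≠ i) :
    (l.set j v).getD i 0 = l.getD i 0 := by
  simp [List.getD_eq_getElem?_getD, List.getElem?_set_ne h]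

theorem pvGetD_set_self (l : List Int) (j : Nat) (v : Int) (h : j < l.length) :
    (l.set j v).getD j 0 = v := by
  simp [List.getD_eq_getElem?_getD, List.getElem?_set_self (by simpa using h)]

theorem pvStepAB (N : Nat) (hN : 1 ≤ N) (teams : List (List (String × Int)))
    (tA : List (Int × Nat)) (tB : List Int) (obj : String × Int)
    (hlen : tB.length = N) (hperm : tA.Perm (pvCanon tB N)) :
    (pvStepA (teams, tA) obj).1 = (pvStepB N (teams, tB) obj).1 ∧
    (pvStepB N (teams, tB) obj).2.length = N ∧
    (pvStepA (teams, tA) obj).2.Perm (pvCanon (pvStepB N (teams, tB) obj).2 N) := by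
  obtain ⟨hjN, hjmin⟩ := pvArgmin_spec tB N hN
  set j := pvArgmin tB N with hjdef
  -- the popped pair is exactly (tB[j], j)
  have hmin : pvLexMin tA = (tB.getD j 0, j) := by
    have hmemc : (tB.getD j 0, j) ∈ pvCanon tB N := by
      exact List.mem_map.2 ⟨j, List.mem_range.2 hjN, rfl⟩
    have hmemA : (tB.getD j 0, j) ∈ tA := hperm.mem_iff.2 hmemc
    cases htA : tA with
    | nil => rw [htA] at hmemA; simp at hmemA
    | cons h t =>
      rw [htA] at hmemA hperm
      obtain ⟨hm, hle⟩ := pvLexMin_fold_spec t h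
      have hmc : t.foldl pvPmin h ∈ pvCanon tB N := hperm.mem_iff.1 hm
      obtain ⟨i, hi, he⟩ := List.mem_map.1 hmc
      have hiN := List.mem_range.1 hi
      have h1 : pvLe (tB.getD j 0, j) (t.foldl pvPmin h) := by
        rw [← he]; exact hjmin i hiN
      have h2 : pvLe (t.foldl pvPmin h) (tB.getD j 0, j) := hle _ hmemA
      simp only [pvLexMin]
      exact pvLe_antisymm h2 h1
  refine ⟨?_, ?_, ?_⟩
  · simp only [pvStepA, pvStepB, hmin]
    rw [← hjdef]
  · simp [pvStepB, hlen]
  · simp only [pvStepA, pvStepB, hmin]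
    rw [← hjdef]
    set L1 := (List.range' 0 j).map (fun i => (tB.getD i 0, i)) with hL1
    set L2 := (List.range' (j+1) (N - j - 1)).map (fun i => (tB.getD i 0, i)) with hL2
    have hsplit := pvCanon_split tB N j hjN
    have herase : (pvCanon tB N).erase (tB.getD j 0, j) = L1 ++ L2 := by
      rw [hsplit, List.erase_append_right _ (pvNotMem_left tB j _), List.erase_cons_head]
    set tB' := tB.set j (tB.getD j 0 + obj.2) with htB'
    have hsplit' : pvCanon tB' N =
        L1 ++ (tB.getD j 0 + obj.2, j) :: L2 := by
      rw [pvCanon_split tB' N j hjN]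
      congr 1
      · rw [hL1]
        apply List.map_congr_left
        intro i hi
        have := (List.mem_range'_1.1 hi).2
        rw [htB', pvGetD_set_ne _ _ _ _ (by omega)]
      · congr 1
        · rw [htB', pvGetD_set_self _ _ _ (by omega)]
        · rw [hL2]
          apply List.map_congr_left
          intro i hi
          have := (List.mem_range'_1.1 hi).1
          rw [htB', pvGetD_set_ne _ _ _ _ (by omega)]
    have p1 : (tA.erase (tB.getD j 0, j) ++ [(tB.getD j 0 + obj.2, j)]).Perm
        ((L1 ++ L2) ++ [(tB.getD j 0 + obj.2, j)]) :=
      (herase ▸ hperm.erase _).append_right _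
    have p2 : ((L1 ++ L2) ++ [(tB.getD j 0 + obj.2, j)]).Perm
        ((tB.getD j 0 + obj.2, j) :: (L1 ++ L2)) := List.perm_append_singleton _ _
    have p3 : ((tB.getD j 0 + obj.2, j) :: (L1 ++ L2)).Perm
        (L1 ++ (tB.getD j 0 + obj.2, j) :: L2) := List.perm_middle.symm
    exact hsplit' ▸ (p1.trans (p2.trans p3))

theorem pvLoopAB (N : Nat) (hN : 1 ≤ N) :
    ∀ (gp : List (String × Int)) (teams : List (List (String × Int)))
      (tA : List (Int × Nat)) (tB : List Int),
      tB.length = N → tA.Perm (pvCanon tB N) →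
      (gp.foldl pvStepA (teams, tA)).1 = (gp.foldl (pvStepB N) (teams, tB)).1 := by
  intro gp
  induction gp with
  | nil => intro teams tA tB _ _; rfl
  | cons obj gp ih =>
    intro teams tA tB hlen hperm
    obtain ⟨h1, h2, h3⟩ := pvStepAB N hN teams tA tB obj hlen hperm
    simp only [List.foldl_cons]
    rw [show pvStepA (teams, tA) obj =
          ((pvStepB N (teams, tB) obj).1, (pvStepA (teams, tA) obj).2) from
        Prod.ext h1 rfl,
        show pvStepB N (teams, tB) obj =
          ((pvStepB N (teams, tB) obj).1, (pvStepB N (teams, tB) obj).2) from rfl]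
    exact ih _ _ _ h2 h3

theorem pvReplicate_getD (N i : Nat) : (List.replicate N (0 : Int)).getD i 0 = 0 := by
  simp [List.getD_eq_getElem?_getD, List.getElem?_replicate]
  split_ifs <;> rfl

-- ===== VERDICT (by name: the statement is the Claim_ definition above) =====
theorem even_teams_spec : Claim_equal_even_teams := by
  intro gp n _ hpre
  unfold Spec_even_teams even_teams even_teams_alt
  cases gp with
  | nil => rfl
  | cons obj gp =>
    have hn : 1 ≤ n := by
      rcases hpre with h | h
      · exact absurd h (by simp)
      · exact h
    have hN : 1 ≤ n.toNat := by omega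
    apply pvLoopAB n.toNat hN
    · simp
    · have : pvCanon (List.replicate n.toNat (0 : Int)) n.toNat =
          (List.range n.toNat).map (fun i => ((0 : Int), i)) := by
        apply List.map_congr_left
        intro i _
        rw [pvReplicate_getD]
      rw [this]
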